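-- pv_equiv track=rewrite | github.com/sharansangolagi1010/CODETAB- | codetab.pynb_file.py | name
-- ===== SOURCE A (Python) =====
-- def name(n):
--     result = ""
--     for i in n:
--         if i == "A":
--             result += "a"
--         elif i == "B":
--             result += "b"
--         elif i == "C":
--             result += "c"
--         elif i == "D":
--             result += "d"
--         else:
--             result += "e"
--     return result
-- ===== SOURCE B (Python) =====
-- def name(n):
--     # Range test + arithmetic case shift instead of a per-letter branch cascade:
--     # characters in 'A'..'D' are lowercased by adding 32 to their code point,
--     # everything else becomes 'e'.
--     return "".join(chr(ord(c) + 32) if "A" <= c <= "D" else "e" for c in n)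
-- ===== Notes on version B (the rewrite author's own statement) =====
-- stated objective: idiomatic
-- what changed: Replaces the per-letter if-elif cascade and string-concatenation accumulator with a single interval test 'A'<=c<='D' plus the arithmetic case shift chr(ord(c)+32), joined in one pass.
import Mathlib
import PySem

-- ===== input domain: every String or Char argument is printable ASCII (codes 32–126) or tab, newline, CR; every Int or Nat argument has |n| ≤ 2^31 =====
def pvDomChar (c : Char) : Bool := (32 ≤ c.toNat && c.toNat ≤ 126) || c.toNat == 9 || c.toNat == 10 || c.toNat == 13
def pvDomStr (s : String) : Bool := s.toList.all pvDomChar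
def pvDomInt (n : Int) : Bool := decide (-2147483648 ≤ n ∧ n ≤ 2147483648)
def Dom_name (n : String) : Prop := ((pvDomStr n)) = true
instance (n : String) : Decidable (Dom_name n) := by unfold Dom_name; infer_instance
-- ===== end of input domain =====

-- B replaces A's per-letter if-elif cascade and string accumulator with one interval test
-- 'A' ≤ c ≤ 'D' plus the arithmetic case shift chr(ord(c)+32) (objective: idiomatic).

-- ===== PORT A =====
-- result is carried as a List Char (String '+=' ported exactly as list append of the one char).
def name (n : String) : String :=
  String.ofList (n.toList.foldl (fun result i =>
    if i = 'A' then result ++ ['a']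
    else if i = 'B' then result ++ ['b']
    else if i = 'C' then result ++ ['c']
    else if i = 'D' then result ++ ['d']
    else result ++ ['e']) [])

-- ===== PORT B =====
-- chr(ord(c)+32) on 'A'..'D' is Char.ofNat (c.toNat + 32); one-char strings joined by "".
def name_alt (n : String) : String :=
  PySem.Str.join "" (n.toList.map (fun c =>
    if 'A' ≤ c ∧ c ≤ 'D' then String.ofList [Char.ofNat (c.toNat + 32)]
    else String.ofList ['e']))

-- ===== PRECONDITION & SPEC =====
def Spec_name (n : String) (out : String) : Prop := out = name_alt n
instance (n : String) (out : String) : Decidable (Spec_name n out) := by unfold Spec_name; infer_instance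

-- ===== CLAIM (what is proved, stated in full; the proofs are below) =====
def Claim_equal_name : Prop := ∀ (n : String), Dom_name n → Spec_name n (name n)

-- ===== LEMMAS AND PROOFS =====
-- the per-character translation both programs implement
def hchar (c : Char) : Char :=
  if c = 'A' then 'a' else if c = 'B' then 'b' else if c = 'C' then 'c'
  else if c = 'D' then 'd' else 'e'

theorem name_foldl_eq (cs : List Char) (acc : List Char) :
    cs.foldl (fun result i =>
      if i = 'A' then result ++ ['a']
      else if i = 'B' then result ++ ['b']
      else if i = 'C' then result ++ ['c']
      else if i = 'D' then result ++ ['d']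
      else result ++ ['e']) acc = acc ++ cs.map hchar := by
  induction cs generalizing acc with
  | nil => simp
  | cons c cs ih =>
    simp only [List.foldl_cons, List.map_cons, ih, hchar]
    split_ifs <;> simp

theorem bchar_eq (c : Char) :
    (if 'A' ≤ c ∧ c ≤ 'D' then String.ofList [Char.ofNat (c.toNat + 32)]
     else String.ofList ['e']) = String.ofList [hchar c] := by
  by_cases h : 'A' ≤ c ∧ c ≤ 'D'
  · have h65 : 65 ≤ c.toNat := h.1
    have h68 : c.toNat ≤ 68 := h.2
    have : c.toNat = 65 ∨ c.toNat = 66 ∨ c.toNat = 67 ∨ c.toNat = 68 := by omega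
    have hc : c = 'A' ∨ c = 'B' ∨ c = 'C' ∨ c = 'D' := by
      rcases this with h' | h' | h' | h' <;>
        [left; (right; left); (right; right; left); (right; right; right)] <;>
        · apply Char.ext
          apply UInt32.toNat_inj.mp
          exact h'
    rcases hc with rfl | rfl | rfl | rfl <;> simp [h, hchar]
  · simp only [if_neg h]
    have h1 : c ≠ 'A' := by rintro rfl; exact h (by decide)
    have h2 : c ≠ 'B' := by rintro rfl; exact h (by decide)
    have h3 : c ≠ 'C' := by rintro rfl; exact h (by decide)
    have h4 : c ≠ 'D' := by rintro rfl; exact h (by decide)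
    simp [hchar, h1, h2, h3, h4]

theorem name_alt_toList (n : String) :
    (name_alt n).toList = n.toList.map hchar := by
  unfold name_alt
  have hmap : (n.toList.map (fun c =>
      if 'A' ≤ c ∧ c ≤ 'D' then String.ofList [Char.ofNat (c.toNat + 32)]
      else String.ofList ['e'])) = n.toList.map (fun c => String.ofList [hchar c]) := by
    apply List.map_congr_left
    intro c _
    exact bchar_eq c
  rw [hmap]
  simp only [PySem.Str.toList_join, List.map_map]
  have : (String.toList ∘ fun c => String.ofList [hchar c]) = (fun c => [c]) ∘ hchar := by
    funext c; simp [String.toList_ofList]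
  rw [this, ← List.map_map]
  exact PySem.Chars.join_nil_singletons _

-- ===== VERDICT (by name: the statement is the Claim_ definition above) =====
theorem name_spec : Claim_equal_name := by
  intro n _
  unfold Spec_name name
  apply String.toList_injective
  rw [name_foldl_eq, name_alt_toList, List.nil_append]
  exact String.toList_ofList
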